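-- pv_equiv track=rewrite | github.com/RayZh-hs/WaveCraft | src/wavecraft/architecture.py | facade_pattern
-- ===== SOURCE A (Python) =====
-- def facade_pattern(length: int, bay_width: int, has_door: bool) -> list[str]:
--     middle_slots = max(1, (length - 2) // max(bay_width, 1))
--     pattern = ["corner"]
--     door_slot = middle_slots // 2 if has_door else -1
--     for slot in range(middle_slots):
--         if slot == door_slot:
--             pattern.append("door")
--         elif slot % 2 == 0:
--             pattern.append("window")
--         else:
--             pattern.append("wall")
--     pattern.append("corner")
--     return pattern
-- ===== SOURCE B (Python) =====
-- def facade_pattern(length: int, bay_width: int, has_door: bool) -> list[str]: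
--     n = max(1, (length - 2) // max(bay_width, 1))
--     # build the middle by replicating the two-slot bay block, then cut to length
--     mids = (["window", "wall"] * ((n + 1) // 2))[:n]
--     if has_door:
--         d = n // 2
--         mids = mids[:d] + ["door"] + mids[d + 1:]
--     return ["corner"] + mids + ["corner"]
-- ===== Notes on version B (the rewrite author's own statement) =====
-- stated objective: alternative
-- what changed: B never iterates over slots: it replicates the two-slot ['window','wall'] bay block (n+1)//2 times, cuts it to n with a slice, and splices the door in via slicing, instead of A's loop with a per-slot three-way branch.
import Mathlib
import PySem

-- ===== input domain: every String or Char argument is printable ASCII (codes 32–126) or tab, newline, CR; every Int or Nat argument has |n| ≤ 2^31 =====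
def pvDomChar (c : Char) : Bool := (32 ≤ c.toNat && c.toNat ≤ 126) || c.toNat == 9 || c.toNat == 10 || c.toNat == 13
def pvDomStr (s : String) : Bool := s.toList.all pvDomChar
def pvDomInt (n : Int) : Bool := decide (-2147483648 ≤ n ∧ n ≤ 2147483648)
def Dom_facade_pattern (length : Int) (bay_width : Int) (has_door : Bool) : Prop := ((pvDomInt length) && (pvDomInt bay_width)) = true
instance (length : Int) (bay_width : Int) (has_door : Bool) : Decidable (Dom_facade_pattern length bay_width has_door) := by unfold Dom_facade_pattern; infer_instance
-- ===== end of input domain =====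

-- B replaces A's per-slot loop by block replication: it repeats the two-slot bay block,
-- cuts it to length, and splices the door in by slicing; same output, no per-element decision.

-- ===== PORT A =====
def facade_pattern (length : Int) (bay_width : Int) (has_door : Bool) : List String :=
  let middle_slots := max 1 (PySem.Int.floordiv (length - 2) (max bay_width 1))
  let pattern := ["corner"]
  let door_slot := if has_door then PySem.Int.floordiv middle_slots 2 else -1
  let pattern := (PySem.List.pyRange 0 middle_slots 1).foldl
    (fun acc slot =>
      if slot == door_slot then acc ++ ["door"]
      else if PySem.Int.mod slot 2 == 0 then acc ++ ["window"]
      else acc ++ ["wall"]) pattern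
  pattern ++ ["corner"]

-- ===== PORT B =====
def facade_pattern_alt (length : Int) (bay_width : Int) (has_door : Bool) : List String :=
  let n := max 1 (PySem.Int.floordiv (length - 2) (max bay_width 1))
  -- Python '["window","wall"] * k' with k = (n+1)//2 ≥ 0: replicate-and-flatten is exact
  let mids := PySem.List.slice
    ((List.replicate (PySem.Int.floordiv (n + 1) 2).toNat ["window", "wall"]).flatten)
    none (some n)
  let mids := if has_door then
      let d := PySem.Int.floordiv n 2
      PySem.List.slice mids none (some d) ++ ["door"] ++ PySem.List.slice mids (some (d + 1)) none
    else mids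
  ["corner"] ++ mids ++ ["corner"]

-- ===== PRECONDITION & SPEC =====
def Spec_facade_pattern (length : Int) (bay_width : Int) (has_door : Bool) (out : List String) : Prop := out = facade_pattern_alt length bay_width has_door
instance (length : Int) (bay_width : Int) (has_door : Bool) (out : List String) : Decidable (Spec_facade_pattern length bay_width has_door out) := by unfold Spec_facade_pattern; infer_instance

-- ===== CLAIM =====
def Claim_equal_facade_pattern : Prop := ∀ (length : Int) (bay_width : Int) (has_door : Bool), Dom_facade_pattern length bay_width has_door → Spec_facade_pattern length bay_width has_door (facade_pattern length bay_width has_door)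

-- ===== LEMMAS AND PROOFS =====

-- element of the replicated bay block: pure parity
theorem flatten_replicate_getElem (k i : Nat) (h : i < ((List.replicate k (["window", "wall"] : List String)).flatten).length) :
    ((List.replicate k (["window", "wall"] : List String)).flatten)[i] =
      if i % 2 = 0 then "window" else "wall" := by
  induction k generalizing i with
  | zero => simp at h
  | succ m ih =>
    simp only [List.replicate_succ, List.flatten_cons] at h ⊢
    match i with
    | 0 => simp
    | 1 => simp
    | (j + 2) =>
      have hj : j < ((List.replicate m (["window", "wall"] : List String)).flatten).length := by
        simp at h ⊢; omega
      have : (["window", "wall"] ++ (List.replicate m (["window", "wall"] : List String)).flatten)[j + 2] =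
          ((List.replicate m (["window", "wall"] : List String)).flatten)[j] := by
        rw [List.getElem_append_right (by simp)]
        simp
      rw [this, ih j hj]
      have : (j + 2) % 2 = j % 2 := by omega
      rw [this]

-- length of the replicated bay block
theorem flatten_replicate_length (k : Nat) :
    ((List.replicate k (["window", "wall"] : List String)).flatten).length = 2 * k := by
  induction k with
  | zero => simp
  | succ m ih => rw [List.replicate_succ, List.flatten_cons]; simp at ih ⊢; omega

-- B's cut replicated block equals the alternating map over the range
theorem rep_take_eq_map (n : Int) (hn : 1 ≤ n) :
    PySem.List.slice
      ((List.replicate (PySem.Int.floordiv (n + 1) 2).toNat (["window", "wall"] : List String)).flatten)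
      none (some n) =
    (PySem.List.pyRange 0 n 1).map
      (fun i => if PySem.Int.mod i 2 == 0 then "window" else "wall") := by
  have hf : PySem.Int.floordiv (n + 1) 2 = (n + 1) / 2 := PySem.Int.floordiv_eq_ediv_of_pos (by omega)
  rw [PySem.List.slice_to _ (by omega : (0:Int) ≤ n)]
  apply List.ext_getElem
  · have hlen := flatten_replicate_length ((PySem.Int.floordiv (n + 1) 2).toNat)
    have h2 : n.toNat ≤ 2 * ((PySem.Int.floordiv (n + 1) 2).toNat) := by rw [hf]; omega
    simp [PySem.List.length_pyRange_one]
    omega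
  · intro k h1 h2
    rw [List.getElem_take, flatten_replicate_getElem, List.getElem_map,
        PySem.List.getElem_pyRange_one]
    have hk : (k : Int) ≥ 0 := by omega
    have hmod : PySem.Int.mod ((0 : Int) + (k : Int)) 2 = ((k % 2 : Nat) : Int) := by
      rw [PySem.Int.mod_eq_emod_of_pos (by omega)]
      omega
    rw [hmod]
    by_cases he : k % 2 = 0
    · simp [he]
    · have : k % 2 = 1 := by omega
      simp [this]

-- A's middle section (foldl body mapped) equals B's patched alternating list.
theorem facade_mid_eq (n : Int) (hn : 1 ≤ n) (has_door : Bool) :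
    (PySem.List.pyRange 0 n 1).map
      (fun slot =>
        if slot == (if has_door then PySem.Int.floordiv n 2 else -1) then "door"
        else if PySem.Int.mod slot 2 == 0 then "window" else "wall") =
    (if has_door then
      ((PySem.List.pyRange 0 n 1).map
        (fun i => if PySem.Int.mod i 2 == 0 then "window" else "wall")).set
        (PySem.Int.floordiv n 2).toNat "door"
     else (PySem.List.pyRange 0 n 1).map
        (fun i => if PySem.Int.mod i 2 == 0 then "window" else "wall")) := by
  cases has_door with
  | false =>
    rw [if_neg (by simp : ¬(false = true)), if_neg (by simp : ¬(false = true))]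
    apply List.map_congr_left
    intro x hx
    rw [PySem.List.mem_pyRange_one] at hx
    have : x ≠ -1 := by omega
    simp [this]
  | true =>
    rw [if_pos rfl, if_pos rfl]
    have hf : PySem.Int.floordiv n 2 = n / 2 := PySem.Int.floordiv_eq_ediv_of_pos (by omega)
    have hds : 0 ≤ PySem.Int.floordiv n 2 ∧ PySem.Int.floordiv n 2 < n := by rw [hf]; omega
    apply List.ext_getElem
    · simp
    · intro k h1 h2
      have hk : (k : Int) < n := by
        have := PySem.List.length_pyRange_one 0 n; simp at h1; omega
      rw [List.getElem_map, List.getElem_set]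
      rw [PySem.List.getElem_pyRange_one]
      rw [hf] at hds
      by_cases he : (n / 2).toNat = k
      · have h3 : (0 : Int) + (k : Int) = n / 2 := by omega
        simp [he, h3]
      · have h3 : (k : Int) ≠ n / 2 := by omega
        rw [List.getElem_map, PySem.List.getElem_pyRange_one]
        simp [he, h3]

-- splice (take d ++ ["door"] ++ drop (d+1)) is the 'set' of the middle element
theorem splice_eq_set (xs : List String) (d : Int) (h0 : 0 ≤ d) (h1 : d < xs.length) :
    PySem.List.slice xs none (some d) ++ ["door"] ++ PySem.List.slice xs (some (d + 1)) none =
      xs.set d.toNat "door" := by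
  rw [PySem.List.slice_to _ h0, PySem.List.slice_from _ (by omega : (0:Int) ≤ d + 1),
      List.set_eq_take_append_cons_drop, if_pos (show d.toNat < xs.length by omega)]
  have ht : (d + 1).toNat = d.toNat + 1 := by omega
  rw [ht]; simp

-- ===== VERDICT =====
theorem facade_pattern_spec : Claim_equal_facade_pattern := by
  intro length bay_width has_door _
  unfold Spec_facade_pattern facade_pattern facade_pattern_alt
  simp only []
  set n := max 1 (PySem.Int.floordiv (length - 2) (max bay_width 1)) with hn
  have h1 : 1 ≤ n := le_max_left _ _
  have hfold : (PySem.List.pyRange 0 n 1).foldl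
      (fun acc slot =>
        if slot == (if has_door then PySem.Int.floordiv n 2 else -1) then acc ++ ["door"]
        else if PySem.Int.mod slot 2 == 0 then acc ++ ["window"]
        else acc ++ ["wall"]) ["corner"] =
      ["corner"] ++ (PySem.List.pyRange 0 n 1).map
        (fun slot =>
          if slot == (if has_door then PySem.Int.floordiv n 2 else -1) then "door"
          else if PySem.Int.mod slot 2 == 0 then "window" else "wall") := by
    rw [← PySem.List.foldl_append_singleton_eq_map]
    congr 1
    funext acc x
    split_ifs <;> rfl
  rw [hfold, facade_mid_eq n h1 has_door, rep_take_eq_map n h1]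
  cases has_door with
  | false => simp
  | true =>
    have hf : PySem.Int.floordiv n 2 = n / 2 := PySem.Int.floordiv_eq_ediv_of_pos (by omega)
    rw [if_pos rfl, if_pos rfl,
        splice_eq_set _ (PySem.Int.floordiv n 2) (by omega)
          (by rw [List.length_map, PySem.List.length_pyRange_one]; omega)]
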